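-- pv_equiv track=rewrite | github.com/b4tim20/time-constraint-theory | paired_condition_report.py | replace_condition_text
-- ===== SOURCE A (Python) =====
-- def replace_condition_text(text: str, monitored: bool) -> str:
--     if not isinstance(text, str):
--         return text
--
--     replacements = [
--         ("fully monitored", "completely private" if not monitored else "fully monitored"),
--         ("completely private", "fully monitored" if monitored else "completely private"),
--         ("monitored", "private" if not monitored else "monitored"),
--         ("private", "monitored" if monitored else "private"),
--         ("transparent", "private" if not monitored else "transparent"),
--         ("unobserved", "observed" if monitored else "unobserved"),
--     ]
--
--     updated = text
--     for old, new in replacements: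
--         updated = updated.replace(old, new)
--     return updated
-- ===== SOURCE B (Python) =====
-- def replace_condition_text(text: str, monitored: bool) -> str:
--     # Single left-to-right scan with a first-match substitution table (instead of six
--     # sequential whole-string replace passes).  The keys of each table start with
--     # distinct characters, so at most one can match at any position and no
--     # longest-first ordering is needed.
--     if not isinstance(text, str):
--         return text
--
--     if monitored:
--         table = [("completely private", "fully monitored"),
--                  ("private", "monitored"),
--                  ("unobserved", "observed")]
--     else:
--         table = [("fully monitored", "completely private"),
--                  ("monitored", "private"),
--                  ("transparent", "private")]
--
--     out = []
--     i = 0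
--     n = len(text)
--     while i < n:
--         for old, new in table:
--             if text.startswith(old, i):
--                 out.append(new)
--                 i += len(old)
--                 break
--         else:
--             out.append(text[i])
--             i += 1
--     return "".join(out)
-- ===== Notes on version B (the rewrite author's own statement) =====
-- stated objective: alternative
-- what changed: Replaces A's six sequential whole-string .replace() passes by a single left-to-right scan that consults a per-flag first-match substitution table (the three effective old->new pairs, noop self-replacements dropped) and emits output in one pass.
import Mathlib
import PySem

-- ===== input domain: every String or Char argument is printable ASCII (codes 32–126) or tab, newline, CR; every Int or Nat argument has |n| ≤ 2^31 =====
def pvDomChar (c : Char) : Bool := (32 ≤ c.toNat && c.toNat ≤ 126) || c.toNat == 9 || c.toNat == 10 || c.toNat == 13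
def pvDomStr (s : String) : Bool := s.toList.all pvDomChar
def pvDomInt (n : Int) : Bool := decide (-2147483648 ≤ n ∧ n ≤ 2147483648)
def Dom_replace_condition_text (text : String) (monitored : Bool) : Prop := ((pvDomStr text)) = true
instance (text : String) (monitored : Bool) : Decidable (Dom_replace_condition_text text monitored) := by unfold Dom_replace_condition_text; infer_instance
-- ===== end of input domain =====

-- B replaces A's six sequential whole-string replace passes by one left-to-right scan
-- with a first-match substitution table chosen by `monitored` (objective: alternative,
-- not measured faster).  Python's `isinstance(text, str)` guard is vacuous here
-- (text : String always).

-- ===== PORT A =====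
def replace_condition_text (text : String) (monitored : Bool) : String :=
  let replacements : List (String × String) :=
    [("fully monitored", if !monitored then "completely private" else "fully monitored"),
     ("completely private", if monitored then "fully monitored" else "completely private"),
     ("monitored", if !monitored then "private" else "monitored"),
     ("private", if monitored then "monitored" else "private"),
     ("transparent", if !monitored then "private" else "transparent"),
     ("unobserved", if monitored then "observed" else "unobserved")]
  replacements.foldl (fun u p => PySem.Str.replace u p.1 p.2) text

-- ===== PORT B =====
-- the substitution table of Source B (keys start with distinct characters)
def pvTable (monitored : Bool) : List (List Char × List Char) :=
  if monitored then
    [("completely private".toList, "fully monitored".toList),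
     ("private".toList, "monitored".toList),
     ("unobserved".toList, "observed".toList)]
  else
    [("fully monitored".toList, "completely private".toList),
     ("monitored".toList, "private".toList),
     ("transparent".toList, "private".toList)]

-- Source B's while loop: at each position try the table entries in order (the for/else),
-- emit the replacement and skip the key, or emit the character.
def pvScan (table : List (List Char × List Char)) : List Char → List Char
  | [] => []
  | c :: rest =>
    match table.find? (fun kv => kv.1.isPrefixOf (c :: rest)) with
    | some kv => kv.2 ++ pvScan table (rest.drop (kv.1.length - 1))
    | none => c :: pvScan table rest
termination_by l => l.length
decreasing_by
  · simp only [List.length_drop, List.length_cons]; omega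
  · simp only [List.length_cons]; omega

def replace_condition_text_alt (text : String) (monitored : Bool) : String :=
  String.ofList (pvScan (pvTable monitored) text.toList)

-- ===== PRECONDITION & SPEC =====
def Spec_replace_condition_text (text : String) (monitored : Bool) (out : String) : Prop := out = replace_condition_text_alt text monitored
instance (text : String) (monitored : Bool) (out : String) : Decidable (Spec_replace_condition_text text monitored out) := by unfold Spec_replace_condition_text; infer_instance

-- ===== CLAIM (what is proved, stated in full; the proofs are below) =====
def Claim_equal_replace_condition_text : Prop := ∀ (text : String) (monitored : Bool), Dom_replace_condition_text text monitored → Spec_replace_condition_text text monitored (replace_condition_text text monitored)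

-- ===== LEMMAS AND PROOFS =====

lemma pvScan_nil (t : List (List Char × List Char)) : pvScan t [] = [] := by
  simp [pvScan]

lemma pvScan_cons_some (t : List (List Char × List Char)) (c : Char) (rest : List Char)
    (kv : List Char × List Char)
    (h : t.find? (fun kv => kv.1.isPrefixOf (c :: rest)) = some kv) :
    pvScan t (c :: rest) = kv.2 ++ pvScan t (rest.drop (kv.1.length - 1)) := by
  rw [pvScan, h]

lemma pvScan_cons_none (t : List (List Char × List Char)) (c : Char) (rest : List Char)
    (h : t.find? (fun kv => kv.1.isPrefixOf (c :: rest)) = none) :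
    pvScan t (c :: rest) = c :: pvScan t rest := by
  rw [pvScan, h]

lemma pvScan_append_key (t : List (List Char × List Char)) (k v r : List Char)
    (hk : k ≠ [])
    (h : t.find? (fun kv => kv.1.isPrefixOf (k ++ r)) = some (k, v)) :
    pvScan t (k ++ r) = v ++ pvScan t r := by
  cases k with
  | nil => exact absurd rfl hk
  | cons c k' =>
    rw [List.cons_append] at h ⊢
    rw [pvScan_cons_some t c (k' ++ r) (c :: k', v) h]
    simp

lemma pvScan_commute (t : List (List Char × List Char)) :
    ∀ (lit X : List Char),
      (∀ s ∈ lit.tails, s ≠ [] → ∀ kv ∈ t, ¬ kv.1 <+: s ∧ ¬ s <+: kv.1) →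
      pvScan t (lit ++ X) = lit ++ pvScan t X := by
  intro lit
  induction lit with
  | nil => intro X _; simp
  | cons c lit' ih =>
    intro X h
    have hfind : t.find? (fun kv => kv.1.isPrefixOf (c :: (lit' ++ X))) = none := by
      rw [List.find?_eq_none]
      intro kv hkv hpre
      have hp : kv.1 <+: (c :: lit') ++ X := by
        simpa using List.isPrefixOf_iff_prefix.mp hpre
      have hs : (c :: lit') <+: (c :: lit') ++ X := List.prefix_append _ _
      have hcons := h (c :: lit') (by simp [List.mem_tails]) (by simp) kv hkv
      rcases List.prefix_or_prefix_of_prefix hp hs with h1 | h1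
      · exact hcons.1 h1
      · exact hcons.2 h1
    rw [List.cons_append, pvScan_cons_none _ _ _ hfind,
      ih X (fun s hs hne kv hkv =>
        h s (by rw [List.tails_cons]; exact List.mem_cons_of_mem _ hs) hne kv hkv)]
    simp

lemma pvScan_prefix_back (t : List (List Char × List Char)) :
    ∀ (X s : List Char),
      (∀ u ∈ s.tails, u ≠ [] → ∀ kv ∈ t, ¬ kv.2 <+: u ∧ ¬ u <+: kv.2) →
      s <+: pvScan t X → s <+: X := by
  intro X
  induction X with
  | nil => intro s _ hp; rwa [pvScan_nil] at hp
  | cons c rest ih =>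
    intro s h hp
    cases hfind : t.find? (fun kv => kv.1.isPrefixOf (c :: rest)) with
    | some kv =>
      rw [pvScan_cons_some _ _ _ _ hfind] at hp
      cases s with
      | nil => exact List.nil_prefix
      | cons a s' =>
        exfalso
        have hkv : kv ∈ t := List.mem_of_find?_eq_some hfind
        have hv : kv.2 <+: kv.2 ++ pvScan t (rest.drop (kv.1.length - 1)) :=
          List.prefix_append _ _
        have hc := h (a :: s') (by simp [List.mem_tails]) (by simp) kv hkv
        rcases List.prefix_or_prefix_of_prefix hp hv with h1 | h1
        · exact hc.2 h1
        · exact hc.1 h1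
    | none =>
      rw [pvScan_cons_none _ _ _ hfind] at hp
      cases s with
      | nil => exact List.nil_prefix
      | cons a s' =>
        rw [List.cons_prefix_cons] at hp
        obtain ⟨rfl, hp'⟩ := hp
        exact List.cons_prefix_cons.mpr ⟨rfl,
          ih s' (fun u hu hne kv hkv =>
            h u (by rw [List.tails_cons]; exact List.mem_cons_of_mem _ hu) hne kv hkv) hp'⟩

lemma pv_go_succ_cons (old new : List Char) (fuel : Nat) (c : Char) (t acc : List Char) :
    PySem.Chars.replace.go old new (fuel + 1) (c :: t) acc =
      if old.isPrefixOf (c :: t) then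
        PySem.Chars.replace.go old new fuel (List.drop old.length (c :: t)) (new.reverse ++ acc)
      else PySem.Chars.replace.go old new fuel t (c :: acc) := by
  simp [PySem.Chars.replace.go]

lemma pv_go_eq_scan (old new : List Char) (hold : old ≠ []) :
    ∀ (fuel : Nat) (l acc : List Char), l.length ≤ fuel →
      PySem.Chars.replace.go old new fuel l acc = acc.reverse ++ pvScan [(old, new)] l := by
  intro fuel
  induction fuel with
  | zero =>
    intro l acc hl
    cases l with
    | nil => simp [PySem.Chars.replace.go, pvScan_nil]
    | cons c t => simp at hl
  | succ fuel ih =>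
    intro l acc hl
    cases l with
    | nil => simp [PySem.Chars.replace.go, pvScan_nil]
    | cons c t =>
      rw [pv_go_succ_cons]
      by_cases hpre : old.isPrefixOf (c :: t)
      · rw [if_pos hpre]
        have hfind : List.find? (fun kv => kv.1.isPrefixOf (c :: t)) [(old, new)]
            = some (old, new) := by simp [List.find?, hpre]
        have hdrop : List.drop old.length (c :: t) = t.drop (old.length - 1) := by
          cases old with
          | nil => exact absurd rfl hold
          | cons o o' => simp
        have hlen : (t.drop (old.length - 1)).length ≤ fuel := by
          simp only [List.length_drop]
          simp only [List.length_cons] at hl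
          omega
        rw [hdrop, ih _ _ hlen, pvScan_cons_some _ _ _ _ hfind]
        simp
      · rw [if_neg hpre]
        have hfind : List.find? (fun kv => kv.1.isPrefixOf (c :: t)) [(old, new)]
            = none := by simp [List.find?, hpre]
        have hlen : t.length ≤ fuel := by
          simp only [List.length_cons] at hl; omega
        rw [ih _ _ hlen, pvScan_cons_none _ _ _ hfind]
        simp

lemma pv_replace_eq_scan (old new : List Char) (hold : old ≠ []) (s : List Char) :
    PySem.Chars.replace s old new = pvScan [(old, new)] s := by
  rw [PySem.Chars.replace]
  rw [if_neg (by simpa [List.isEmpty_iff] using hold)]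
  simpa using pv_go_eq_scan old new hold s.length s [] le_rfl

lemma pvScan_id (k : List Char) (hk : k ≠ []) :
    ∀ (n : Nat) (l : List Char), l.length ≤ n → pvScan [(k, k)] l = l := by
  intro n
  induction n with
  | zero =>
    intro l hl
    cases l with
    | nil => exact pvScan_nil _
    | cons c t => simp at hl
  | succ n ih =>
    intro l hl
    cases l with
    | nil => exact pvScan_nil _
    | cons c t =>
      by_cases hpre : k.isPrefixOf (c :: t)
      · obtain ⟨r, hr⟩ := List.isPrefixOf_iff_prefix.mp hpre
        have hklen : 1 ≤ k.length := by
          cases k with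
          | nil => exact absurd rfl hk
          | cons _ _ => simp
        have hrlen : r.length ≤ n := by
          have := congrArg List.length hr
          simp only [List.length_append, List.length_cons] at this
          simp only [List.length_cons] at hl
          omega
        have hself : k.isPrefixOf (k ++ r) = true :=
          List.isPrefixOf_iff_prefix.mpr (List.prefix_append _ _)
        rw [← hr, pvScan_append_key [(k, k)] k k r hk
          (by simp [List.find?, hself]),
          ih r hrlen]
      · have hfind : List.find? (fun kv => kv.1.isPrefixOf (c :: t)) [(k, k)] = none := by
          simp [List.find?, hpre]
        have hlen : t.length ≤ n := by simp only [List.length_cons] at hl; omega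
        rw [pvScan_cons_none _ _ _ hfind, ih t hlen]

lemma pv_len_le (k r rest : List Char) (c : Char) (n : Nat)
    (hr : k ++ r = c :: rest) (hk : k ≠ []) (hl : (c :: rest).length ≤ n + 1) :
    r.length ≤ n := by
  have hlen := congrArg List.length hr
  simp only [List.length_append, List.length_cons] at hlen hl
  cases k with
  | nil => exact absurd rfl hk
  | cons _ k' => simp only [List.length_cons] at hlen; omega

-- the merge of the three effective single-key passes into the one-pass scan, monitored = true
lemma pv_mainT : ∀ (n : Nat) (l : List Char), l.length ≤ n →
    pvScan [("unobserved".toList, "observed".toList)]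
      (pvScan [("private".toList, "monitored".toList)]
        (pvScan [("completely private".toList, "fully monitored".toList)] l))
    = pvScan (pvTable true) l := by
  intro n
  induction n with
  | zero =>
    intro l hl
    have : l = [] := List.eq_nil_of_length_eq_zero (Nat.le_zero.mp hl)
    subst this
    simp [pvScan_nil]
  | succ n ih =>
    intro l hl
    cases l with
    | nil => simp [pvScan_nil]
    | cons c rest =>
      by_cases hCP : "completely private".toList <+: (c :: rest)
      · obtain ⟨r, hr⟩ := hCP
        have hrlen : r.length ≤ n := pv_len_le _ _ _ _ _ hr (by decide) hl
        rw [← hr,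
          pvScan_append_key [("completely private".toList, "fully monitored".toList)]
            "completely private".toList "fully monitored".toList r (by decide)
            (by simp [List.find?]),
          pvScan_commute [("private".toList, "monitored".toList)]
            "fully monitored".toList _ (by decide),
          pvScan_commute [("unobserved".toList, "observed".toList)]
            "fully monitored".toList _ (by decide),
          pvScan_append_key (pvTable true)
            "completely private".toList "fully monitored".toList r (by decide)
            (by simp [pvTable]),
          ih r hrlen]
      · by_cases hP : "private".toList <+: (c :: rest)
        · obtain ⟨r, hr⟩ := hP
          have hrlen : r.length ≤ n := pv_len_le _ _ _ _ _ hr (by decide) hl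
          rw [← hr,
            pvScan_commute [("completely private".toList, "fully monitored".toList)]
              "private".toList _ (by decide),
            pvScan_append_key [("private".toList, "monitored".toList)]
              "private".toList "monitored".toList _ (by decide)
              (by simp [List.find?]),
            pvScan_commute [("unobserved".toList, "observed".toList)]
              "monitored".toList _ (by decide),
            pvScan_append_key (pvTable true)
              "private".toList "monitored".toList r (by decide)
              (by simp [pvTable, List.find?, List.isPrefixOf]),
            ih r hrlen]
        · by_cases hU : "unobserved".toList <+: (c :: rest)
          · obtain ⟨r, hr⟩ := hU
            have hrlen : r.length ≤ n := pv_len_le _ _ _ _ _ hr (by decide) hl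
            rw [← hr,
              pvScan_commute [("completely private".toList, "fully monitored".toList)]
                "unobserved".toList _ (by decide),
              pvScan_commute [("private".toList, "monitored".toList)]
                "unobserved".toList _ (by decide),
              pvScan_append_key [("unobserved".toList, "observed".toList)]
                "unobserved".toList "observed".toList _ (by decide)
                (by simp [List.find?]),
              pvScan_append_key (pvTable true)
                "unobserved".toList "observed".toList r (by decide)
                (by simp [pvTable, List.find?, List.isPrefixOf]),
              ih r hrlen]
          · have hlen : rest.length ≤ n := by
              simp only [List.length_cons] at hl; omega
            have h1 : pvScan [("completely private".toList, "fully monitored".toList)]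
                (c :: rest)
                = c :: pvScan [("completely private".toList, "fully monitored".toList)] rest :=
              pvScan_cons_none _ _ _ (by
                rw [List.find?_eq_none]
                intro kv hkv
                simp only [List.mem_singleton] at hkv
                subst hkv
                simpa [List.isPrefixOf_iff_prefix] using hCP)
            have hP1 : ¬ "private".toList <+:
                (c :: pvScan [("completely private".toList, "fully monitored".toList)] rest) := by
              intro hx
              rw [show "private".toList = 'p' :: "rivate".toList from rfl,
                List.cons_prefix_cons] at hx
              obtain ⟨hc, hx'⟩ := hx
              have hb := pvScan_prefix_back
                [("completely private".toList, "fully monitored".toList)] rest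
                "rivate".toList (by decide) hx'
              exact hP (by
                rw [show "private".toList = 'p' :: "rivate".toList from rfl]
                exact List.cons_prefix_cons.mpr ⟨hc, hb⟩)
            have h2 : pvScan [("private".toList, "monitored".toList)]
                (c :: pvScan [("completely private".toList, "fully monitored".toList)] rest)
                = c :: pvScan [("private".toList, "monitored".toList)]
                    (pvScan [("completely private".toList, "fully monitored".toList)] rest) :=
              pvScan_cons_none _ _ _ (by
                rw [List.find?_eq_none]
                intro kv hkv
                simp only [List.mem_singleton] at hkv
                subst hkv
                simpa [List.isPrefixOf_iff_prefix] using hP1)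
            have hU1 : ¬ "unobserved".toList <+:
                (c :: pvScan [("private".toList, "monitored".toList)]
                  (pvScan [("completely private".toList, "fully monitored".toList)] rest)) := by
              intro hx
              rw [show "unobserved".toList = 'u' :: "nobserved".toList from rfl,
                List.cons_prefix_cons] at hx
              obtain ⟨hc, hx'⟩ := hx
              have hb1 := pvScan_prefix_back [("private".toList, "monitored".toList)] _
                "nobserved".toList (by decide) hx'
              have hb2 := pvScan_prefix_back
                [("completely private".toList, "fully monitored".toList)] rest
                "nobserved".toList (by decide) hb1
              exact hU (by
                rw [show "unobserved".toList = 'u' :: "nobserved".toList from rfl]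
                exact List.cons_prefix_cons.mpr ⟨hc, hb2⟩)
            have h3 : pvScan [("unobserved".toList, "observed".toList)]
                (c :: pvScan [("private".toList, "monitored".toList)]
                  (pvScan [("completely private".toList, "fully monitored".toList)] rest))
                = c :: pvScan [("unobserved".toList, "observed".toList)]
                    (pvScan [("private".toList, "monitored".toList)]
                      (pvScan [("completely private".toList, "fully monitored".toList)] rest)) :=
              pvScan_cons_none _ _ _ (by
                rw [List.find?_eq_none]
                intro kv hkv
                simp only [List.mem_singleton] at hkv
                subst hkv
                simpa [List.isPrefixOf_iff_prefix] using hU1)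
            have hR : pvScan (pvTable true) (c :: rest) = c :: pvScan (pvTable true) rest :=
              pvScan_cons_none _ _ _ (by
                rw [List.find?_eq_none]
                intro kv hkv
                simp only [pvTable, if_true, List.mem_cons, List.not_mem_nil,
                  or_false] at hkv
                rcases hkv with rfl | rfl | rfl
                · simpa [List.isPrefixOf_iff_prefix] using hCP
                · simpa [List.isPrefixOf_iff_prefix] using hP
                · simpa [List.isPrefixOf_iff_prefix] using hU)
            rw [h1, h2, h3, hR, ih rest hlen]

-- the merge of the three effective single-key passes into the one-pass scan, monitored = false
lemma pv_mainF : ∀ (n : Nat) (l : List Char), l.length ≤ n →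
    pvScan [("transparent".toList, "private".toList)]
      (pvScan [("monitored".toList, "private".toList)]
        (pvScan [("fully monitored".toList, "completely private".toList)] l))
    = pvScan (pvTable false) l := by
  intro n
  induction n with
  | zero =>
    intro l hl
    have : l = [] := List.eq_nil_of_length_eq_zero (Nat.le_zero.mp hl)
    subst this
    simp [pvScan_nil]
  | succ n ih =>
    intro l hl
    cases l with
    | nil => simp [pvScan_nil]
    | cons c rest =>
      by_cases hFM : "fully monitored".toList <+: (c :: rest)
      · obtain ⟨r, hr⟩ := hFM
        have hrlen : r.length ≤ n := pv_len_le _ _ _ _ _ hr (by decide) hl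
        rw [← hr,
          pvScan_append_key [("fully monitored".toList, "completely private".toList)]
            "fully monitored".toList "completely private".toList r (by decide)
            (by simp [List.find?]),
          pvScan_commute [("monitored".toList, "private".toList)]
            "completely private".toList _ (by decide),
          pvScan_commute [("transparent".toList, "private".toList)]
            "completely private".toList _ (by decide),
          pvScan_append_key (pvTable false)
            "fully monitored".toList "completely private".toList r (by decide)
            (by simp [pvTable]),
          ih r hrlen]
      · by_cases hM : "monitored".toList <+: (c :: rest)
        · obtain ⟨r, hr⟩ := hM
          have hrlen : r.length ≤ n := pv_len_le _ _ _ _ _ hr (by decide) hl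
          rw [← hr,
            pvScan_commute [("fully monitored".toList, "completely private".toList)]
              "monitored".toList _ (by decide),
            pvScan_append_key [("monitored".toList, "private".toList)]
              "monitored".toList "private".toList _ (by decide)
              (by simp [List.find?]),
            pvScan_commute [("transparent".toList, "private".toList)]
              "private".toList _ (by decide),
            pvScan_append_key (pvTable false)
              "monitored".toList "private".toList r (by decide)
              (by simp [pvTable, List.find?, List.isPrefixOf]),
            ih r hrlen]
        · by_cases hT : "transparent".toList <+: (c :: rest)
          · obtain ⟨r, hr⟩ := hT
            have hrlen : r.length ≤ n := pv_len_le _ _ _ _ _ hr (by decide) hl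
            rw [← hr,
              pvScan_commute [("fully monitored".toList, "completely private".toList)]
                "transparent".toList _ (by decide),
              pvScan_commute [("monitored".toList, "private".toList)]
                "transparent".toList _ (by decide),
              pvScan_append_key [("transparent".toList, "private".toList)]
                "transparent".toList "private".toList _ (by decide)
                (by simp [List.find?]),
              pvScan_append_key (pvTable false)
                "transparent".toList "private".toList r (by decide)
                (by simp [pvTable, List.find?, List.isPrefixOf]),
              ih r hrlen]
          · have hlen : rest.length ≤ n := by
              simp only [List.length_cons] at hl; omega
            have h1 : pvScan [("fully monitored".toList, "completely private".toList)]
                (c :: rest)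
                = c :: pvScan [("fully monitored".toList, "completely private".toList)] rest :=
              pvScan_cons_none _ _ _ (by
                rw [List.find?_eq_none]
                intro kv hkv
                simp only [List.mem_singleton] at hkv
                subst hkv
                simpa [List.isPrefixOf_iff_prefix] using hFM)
            have hM1 : ¬ "monitored".toList <+:
                (c :: pvScan [("fully monitored".toList, "completely private".toList)] rest) := by
              intro hx
              rw [show "monitored".toList = 'm' :: "onitored".toList from rfl,
                List.cons_prefix_cons] at hx
              obtain ⟨hc, hx'⟩ := hx
              have hb := pvScan_prefix_back
                [("fully monitored".toList, "completely private".toList)] rest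
                "onitored".toList (by decide) hx'
              exact hM (by
                rw [show "monitored".toList = 'm' :: "onitored".toList from rfl]
                exact List.cons_prefix_cons.mpr ⟨hc, hb⟩)
            have h2 : pvScan [("monitored".toList, "private".toList)]
                (c :: pvScan [("fully monitored".toList, "completely private".toList)] rest)
                = c :: pvScan [("monitored".toList, "private".toList)]
                    (pvScan [("fully monitored".toList, "completely private".toList)] rest) :=
              pvScan_cons_none _ _ _ (by
                rw [List.find?_eq_none]
                intro kv hkv
                simp only [List.mem_singleton] at hkv
                subst hkv
                simpa [List.isPrefixOf_iff_prefix] using hM1)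
            have hT1 : ¬ "transparent".toList <+:
                (c :: pvScan [("monitored".toList, "private".toList)]
                  (pvScan [("fully monitored".toList, "completely private".toList)] rest)) := by
              intro hx
              rw [show "transparent".toList = 't' :: "ransparent".toList from rfl,
                List.cons_prefix_cons] at hx
              obtain ⟨hc, hx'⟩ := hx
              have hb1 := pvScan_prefix_back [("monitored".toList, "private".toList)] _
                "ransparent".toList (by decide) hx'
              have hb2 := pvScan_prefix_back
                [("fully monitored".toList, "completely private".toList)] rest
                "ransparent".toList (by decide) hb1
              exact hT (by
                rw [show "transparent".toList = 't' :: "ransparent".toList from rfl]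
                exact List.cons_prefix_cons.mpr ⟨hc, hb2⟩)
            have h3 : pvScan [("transparent".toList, "private".toList)]
                (c :: pvScan [("monitored".toList, "private".toList)]
                  (pvScan [("fully monitored".toList, "completely private".toList)] rest))
                = c :: pvScan [("transparent".toList, "private".toList)]
                    (pvScan [("monitored".toList, "private".toList)]
                      (pvScan [("fully monitored".toList, "completely private".toList)] rest)) :=
              pvScan_cons_none _ _ _ (by
                rw [List.find?_eq_none]
                intro kv hkv
                simp only [List.mem_singleton] at hkv
                subst hkv
                simpa [List.isPrefixOf_iff_prefix] using hT1)
            have hR : pvScan (pvTable false) (c :: rest) = c :: pvScan (pvTable false) rest :=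
              pvScan_cons_none _ _ _ (by
                rw [List.find?_eq_none]
                intro kv hkv
                simp only [pvTable, if_false, Bool.false_eq_true, List.mem_cons,
                  List.not_mem_nil, or_false] at hkv
                rcases hkv with rfl | rfl | rfl
                · simpa [List.isPrefixOf_iff_prefix] using hFM
                · simpa [List.isPrefixOf_iff_prefix] using hM
                · simpa [List.isPrefixOf_iff_prefix] using hT)
            rw [h1, h2, h3, hR, ih rest hlen]

-- A's six chained replace passes on char lists equal B's scan (noop passes removed
-- by pvScan_id, real passes rewritten to single-key scans and merged by pv_mainT/F)
lemma pv_chainT (l : List Char) :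
    PySem.Chars.replace
      (PySem.Chars.replace
        (PySem.Chars.replace
          (PySem.Chars.replace
            (PySem.Chars.replace
              (PySem.Chars.replace l "fully monitored".toList "fully monitored".toList)
              "completely private".toList "fully monitored".toList)
            "monitored".toList "monitored".toList)
          "private".toList "monitored".toList)
        "transparent".toList "transparent".toList)
      "unobserved".toList "observed".toList
    = pvScan (pvTable true) l := by
  rw [pv_replace_eq_scan _ _ (by decide), pv_replace_eq_scan _ _ (by decide),
    pv_replace_eq_scan _ _ (by decide), pv_replace_eq_scan _ _ (by decide),
    pv_replace_eq_scan _ _ (by decide), pv_replace_eq_scan _ _ (by decide)]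
  rw [pvScan_id _ (by decide) _ l le_rfl]
  rw [pvScan_id _ (by decide) _ _ le_rfl]
  rw [pvScan_id _ (by decide) _ _ le_rfl]
  exact pv_mainT _ _ le_rfl

lemma pv_chainF (l : List Char) :
    PySem.Chars.replace
      (PySem.Chars.replace
        (PySem.Chars.replace
          (PySem.Chars.replace
            (PySem.Chars.replace
              (PySem.Chars.replace l "fully monitored".toList "completely private".toList)
              "completely private".toList "completely private".toList)
            "monitored".toList "private".toList)
          "private".toList "private".toList)
        "transparent".toList "private".toList)
      "unobserved".toList "unobserved".toList
    = pvScan (pvTable false) l := by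
  rw [pv_replace_eq_scan _ _ (by decide), pv_replace_eq_scan _ _ (by decide),
    pv_replace_eq_scan _ _ (by decide), pv_replace_eq_scan _ _ (by decide),
    pv_replace_eq_scan _ _ (by decide), pv_replace_eq_scan _ _ (by decide)]
  rw [pvScan_id _ (by decide) _ _ le_rfl]
  rw [pvScan_id _ (by decide) _ _ le_rfl]
  rw [pvScan_id _ (by decide) _ _ le_rfl]
  exact pv_mainF _ _ le_rfl

-- ===== VERDICT (by name: the statement is the Claim_ definition above) =====
theorem replace_condition_text_spec : Claim_equal_replace_condition_text := by
  intro text monitored _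
  unfold Spec_replace_condition_text replace_condition_text replace_condition_text_alt
  cases monitored
  · simp only [List.foldl, Bool.not_false, if_true, if_false, Bool.false_eq_true]
    simp only [PySem.Str.replace, String.toList_ofList]
    exact congrArg String.ofList (pv_chainF text.toList)
  · simp only [List.foldl, Bool.not_true, if_true, if_false, Bool.false_eq_true]
    simp only [PySem.Str.replace, String.toList_ofList]
    exact congrArg String.ofList (pv_chainT text.toList)
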